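-- pv_equiv track=rewrite | github.com/hessenh/HAR-Pipeline | hunt_extraction.py | make_labels_for_timestamps
-- ===== SOURCE A (Python) =====
-- def make_labels_for_timestamps(timestamps, labels_list, end_times_list):
--     labels_for_timestamps = []
--
--     next_timestamp_index = 0
--
--     l = zip(labels_list, end_times_list)
--     for label, end_time in l:
--         while next_timestamp_index < len(timestamps) and timestamps[next_timestamp_index] <= end_time:
--             labels_for_timestamps.append(label)
--             next_timestamp_index += 1
--
--     return labels_for_timestamps
-- ===== SOURCE B (Python) =====
-- def make_labels_for_timestamps(timestamps, labels_list, end_times_list):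
--     # Inverted loop nesting: iterate timestamps once, advancing a monotone
--     # label-interval pointer; stop as soon as the pairs are exhausted.
--     n = min(len(labels_list), len(end_times_list))
--     out = []
--     li = 0
--     for t in timestamps:
--         while li < n and end_times_list[li] < t:
--             li += 1
--         if li == n:
--             break
--         out.append(labels_list[li])
--     return out
-- ===== Notes on version B (the rewrite author's own statement) =====
-- stated objective: alternative
-- what changed: Inverts the loop nesting: a single pass over timestamps with a monotone interval pointer that advances past expired end-times, instead of an outer loop over label/end-time pairs consuming timestamps in an inner while; B also stops early once the pairs are exhausted.
import Mathlib
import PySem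

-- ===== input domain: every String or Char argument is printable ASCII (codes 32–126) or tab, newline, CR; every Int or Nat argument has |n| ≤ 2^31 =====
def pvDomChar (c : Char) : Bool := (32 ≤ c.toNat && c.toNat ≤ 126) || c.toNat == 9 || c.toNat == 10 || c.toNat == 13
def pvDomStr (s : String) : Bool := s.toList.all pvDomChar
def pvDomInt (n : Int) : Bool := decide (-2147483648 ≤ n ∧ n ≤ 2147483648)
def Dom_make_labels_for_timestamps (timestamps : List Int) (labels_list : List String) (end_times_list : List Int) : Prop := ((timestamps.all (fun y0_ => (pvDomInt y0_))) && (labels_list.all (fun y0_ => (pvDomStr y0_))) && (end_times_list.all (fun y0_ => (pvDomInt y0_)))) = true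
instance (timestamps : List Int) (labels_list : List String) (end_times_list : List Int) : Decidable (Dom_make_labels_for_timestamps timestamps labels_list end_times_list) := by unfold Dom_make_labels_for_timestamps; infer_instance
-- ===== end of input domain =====

-- ===== PORT A =====
-- A: outer loop over zip(labels, end_times); inner while consumes timestamps while ts[i] <= end_time.
def mlftA_inner (ts : List Int) (label : String) (e : Int) (i : Nat) (acc : List String) :
    Nat × List String :=
  if h : i < ts.length ∧ ts.getD i 0 ≤ e then
    mlftA_inner ts label e (i + 1) (acc ++ [label])
  else
    (i, acc)
termination_by ts.length - i
decreasing_by omega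

def mlftA_outer (ts : List Int) : List (String × Int) → Nat → List String → List String
  | [], _, acc => acc
  | (lab, e) :: ps, i, acc =>
      let r := mlftA_inner ts lab e i acc
      mlftA_outer ts ps r.1 r.2

def make_labels_for_timestamps (timestamps : List Int) (labels_list : List String) (end_times_list : List Int) : List String :=
  mlftA_outer timestamps (labels_list.zip end_times_list) 0 []

-- ===== PORT B =====
-- B: single pass over timestamps; a monotone pointer li skips expired end-times; break when pairs run out.
def mlftB_adv (ends : List Int) (n : Nat) (t : Int) (li : Nat) : Nat :=
  if h : li < n ∧ ends.getD li 0 < t then mlftB_adv ends n t (li + 1) else li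
termination_by n - li
decreasing_by omega

def mlftB_go (labels : List String) (ends : List Int) (n : Nat) : List Int → Nat → List String
  | [], _ => []
  | t :: rest, li =>
      let li' := mlftB_adv ends n t li
      if li' = n then [] else labels.getD li' "" :: mlftB_go labels ends n rest li'

def make_labels_for_timestamps_alt (timestamps : List Int) (labels_list : List String) (end_times_list : List Int) : List String :=
  mlftB_go labels_list end_times_list (min labels_list.length end_times_list.length) timestamps 0

-- ===== PRECONDITION & SPEC =====
def Spec_make_labels_for_timestamps (timestamps : List Int) (labels_list : List String) (end_times_list : List Int) (out : List String) : Prop := out = make_labels_for_timestamps_alt timestamps labels_list end_times_list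
instance (timestamps : List Int) (labels_list : List String) (end_times_list : List Int) (out : List String) : Decidable (Spec_make_labels_for_timestamps timestamps labels_list end_times_list out) := by unfold Spec_make_labels_for_timestamps; infer_instance

-- ===== CLAIM (what is proved, stated in full; the proofs are below) =====
def Claim_equal_make_labels_for_timestamps : Prop := ∀ (timestamps : List Int) (labels_list : List String) (end_times_list : List Int), Dom_make_labels_for_timestamps timestamps labels_list end_times_list → Spec_make_labels_for_timestamps timestamps labels_list end_times_list (make_labels_for_timestamps timestamps labels_list end_times_list)

-- ===== LEMMAS AND PROOFS =====
-- A's inner loop unfolds one step when its guard holds / fails.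
theorem mlftA_inner_eq (ts : List Int) (lab : String) (e : Int) (i : Nat) (acc : List String) :
    mlftA_inner ts lab e i acc =
      if i < ts.length ∧ ts.getD i 0 ≤ e then mlftA_inner ts lab e (i + 1) (acc ++ [lab])
      else (i, acc) := by
  rw [mlftA_inner]; split <;> simp_all

theorem mlftB_adv_eq (ends : List Int) (n : Nat) (t : Int) (li : Nat) :
    mlftB_adv ends n t li =
      if li < n ∧ ends.getD li 0 < t then mlftB_adv ends n t (li + 1) else li := by
  rw [mlftB_adv]; split <;> simp_all

-- When the timestamps are exhausted, A's remaining outer iterations do nothing.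
theorem mlftA_outer_done (ts : List Int) (P : List (String × Int)) (i : Nat) (acc : List String)
    (h : ts.length ≤ i) : mlftA_outer ts P i acc = acc := by
  induction P generalizing i acc with
  | nil => rfl
  | cons p ps ih =>
      obtain ⟨lab, e⟩ := p
      simp only [mlftA_outer]
      rw [mlftA_inner_eq]
      have : ¬ (i < ts.length ∧ ts.getD i 0 ≤ e) := by omega
      simp only [if_neg this]
      exact ih i acc h

-- When the pointer has reached n, B produces nothing.
theorem mlftB_go_done (labels : List String) (ends : List Int) (n : Nat) (l : List Int) :
    mlftB_go labels ends n l n = [] := by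
  cases l with
  | nil => rfl
  | cons t rest =>
      simp only [mlftB_go]
      rw [mlftB_adv_eq]
      simp

-- Main invariant: A's outer loop from the li-th pair with timestamp index i and accumulator acc
-- equals acc followed by B's pass over the remaining timestamps with pointer li.
theorem mlft_main (labels : List String) (ends : List Int) (ts : List Int) :
    ∀ k li i acc, (labels.zip ends).length - li + (ts.length - i) ≤ k → li ≤ (labels.zip ends).length →
      mlftA_outer ts ((labels.zip ends).drop li) i acc =
        acc ++ mlftB_go labels ends (labels.zip ends).length (ts.drop i) li := by
  intro k
  induction k with
  | zero =>
      intro li i acc hk hle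
      have hli : li = (labels.zip ends).length := by omega
      have hi : ts.length ≤ i := by omega
      subst hli
      rw [List.drop_length, mlftA_outer, mlftB_go_done]
      simp
  | succ k ih =>
      intro li i acc hk hle
      by_cases hlin : li < (labels.zip ends).length
      · -- pairs remain
        set n := (labels.zip ends).length with hn
        have hdropP : (labels.zip ends).drop li =
            (labels.zip ends)[li] :: (labels.zip ends).drop (li + 1) :=
          List.drop_eq_getElem_cons hlin
        have hlab : li < labels.length := by
          have := List.length_zip (l₁ := labels) (l₂ := ends); omega
        have hend : li < ends.length := by
          have := List.length_zip (l₁ := labels) (l₂ := ends); omega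
        have hpair : (labels.zip ends)[li] = (labels[li], ends[li]) := List.getElem_zip ..
        by_cases hits : i < ts.length
        · -- a timestamp remains
          have hdropT : ts.drop i = ts[i] :: ts.drop (i + 1) := List.drop_eq_getElem_cons hits
          have htget : ts.getD i 0 = ts[i] := List.getD_eq_getElem ts 0 hits
          have heget : ends.getD li 0 = ends[li] := List.getD_eq_getElem ends 0 hend
          have hlget : labels.getD li "" = labels[li] := List.getD_eq_getElem labels "" hlab
          by_cases hle2 : ts[i] ≤ ends[li]
          · -- A consumes ts[i] with this label; B's pointer does not move
            have hA : mlftA_outer ts ((labels.zip ends).drop li) i acc =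
                mlftA_outer ts ((labels.zip ends).drop li) (i + 1) (acc ++ [labels[li]]) := by
              rw [hdropP, hpair]
              simp only [mlftA_outer]
              rw [mlftA_inner_eq]
              have : i < ts.length ∧ ts.getD i 0 ≤ ends[li] := ⟨hits, by rw [htget]; exact hle2⟩
              simp only [if_pos this]
            have hadv : mlftB_adv ends n ts[i] li = li := by
              rw [mlftB_adv_eq]
              have : ¬ (li < n ∧ ends.getD li 0 < ts[i]) := by
                rintro ⟨_, h2⟩; rw [heget] at h2; omega
              rw [if_neg this]
            rw [hA, ih li (i + 1) (acc ++ [labels[li]]) (by omega) hle]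
            rw [hdropT]
            simp only [mlftB_go, hadv]
            have : ¬ li = n := by omega
            rw [if_neg this, hlget]
            simp
          · -- end time expired: A moves to the next pair, B advances the pointer
            have hA : mlftA_outer ts ((labels.zip ends).drop li) i acc =
                mlftA_outer ts ((labels.zip ends).drop (li + 1)) i acc := by
              rw [hdropP, hpair]
              simp only [mlftA_outer]
              rw [mlftA_inner_eq]
              have : ¬ (i < ts.length ∧ ts.getD i 0 ≤ ends[li]) := by
                rintro ⟨_, h2⟩; rw [htget] at h2; omega
              simp only [if_neg this]
            have hadv : mlftB_adv ends n ts[i] li = mlftB_adv ends n ts[i] (li + 1) := by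
              rw [mlftB_adv_eq]
              have : li < n ∧ ends.getD li 0 < ts[i] := ⟨hlin, by rw [heget]; omega⟩
              rw [if_pos this]
            rw [hA, ih (li + 1) i acc (by omega) (by omega)]
            rw [hdropT]
            simp only [mlftB_go, hadv]
        · -- timestamps exhausted
          rw [mlftA_outer_done ts _ i acc (by omega),
            List.drop_eq_nil_of_le (by omega : ts.length ≤ i)]
          simp [mlftB_go]
      · -- pairs exhausted
        have hli : li = (labels.zip ends).length := by omega
        subst hli
        rw [List.drop_length, mlftA_outer, mlftB_go_done]
        simp

-- ===== VERDICT (by name: the statement is the Claim_ definition above) =====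
theorem make_labels_for_timestamps_spec : Claim_equal_make_labels_for_timestamps := by
  intro ts labels ends _
  unfold Spec_make_labels_for_timestamps make_labels_for_timestamps make_labels_for_timestamps_alt
  have h := mlft_main labels ends ts ((labels.zip ends).length + ts.length) 0 0 [] (by omega) (by omega)
  simpa [List.length_zip] using h
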